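-- pv_equiv track=rewrite | github.com/USF-DNA-Knot-Math/2D-tesselation-links | Tesselations/Link_Tesselations_2D/Link_Tesselations_2D/.ipynb_checkpoints/Plotting_Functions-checkpoint.py | track_coordinates_and_rectangle
-- ===== SOURCE A (Python) =====
-- def get_coordinate_deltas(start,ending):
--     coordinate_deltas={
--         ('a','a') : (0,-1),
--         ('a','A') : (0,1),
--         ('a','b') : (-1,0),
--         ('a','B') : (1, 0),
--         ('b','a') : (0,-1),
--         ('b','A') : (0,+1),
--         ('b','b') : (-1,0),
--         ('b', 'B') : (1,0),
--         ('A','a') : (0,-1),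
--         ('A','A') : (0,1),
--         ('A','b') : (-1,0),
--         ('A','B') : (1,0),
--         ('B','a') : (0,-1),
--         ('B','A') : (0,1),
--         ('B','b') : (-1,0),
--         ('B','B') : (1,0)
--         }
--     return coordinate_deltas[(start,ending)]
--
-- def track_coordinates_and_rectangle(curve):
--     '''
--     Tracks coordinates and minimal rectangle of a curve (in the order given)
--     Args:
--         curve: As a list of chords.
--     Returns:
--         coordinates, rectangle
--     '''
--     max_i=0; min_i=0
--     max_j=0; min_j=0
--     i,j=(0,0)
--     for chord in curve:
--         delta=get_coordinate_deltas(chord[0][0],chord[1][0])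
--         max_i=max(max_i,i)
--         max_j=max(max_j,j)
--         min_i=min(min_i,i)
--         min_j=min(min_j,j)
--         i+=delta[0]
--         j+=delta[1]
--     return (i,j), (max_i-min_i+1,max_j-min_j+1)
-- ===== SOURCE B (Python) =====
-- # Two-phase decomposition: walk the curve collecting the cell each chord occupies,
-- # then read the rectangle off that list with min/max.
-- DELTAS = {'a': (0, -1), 'A': (0, 1), 'b': (-1, 0), 'B': (1, 0)}
--
-- def track_coordinates_and_rectangle(curve):
--     """Walk the curve from the origin. Each chord occupies the cell the walk is
--     currently in; the walk moves on after placing it. The rectangle is the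
--     bounding box of the occupied cells (the origin cell always counts)."""
--     cells = [(0, 0)]
--     i, j = 0, 0
--     for start, ending in curve:
--         cells.append((i, j))
--         di, dj = DELTAS[ending[0]]
--         i, j = i + di, j + dj
--     xs = [x for x, _ in cells]
--     ys = [y for _, y in cells]
--     return (i, j), (max(xs) - min(xs) + 1, max(ys) - min(ys) + 1)
-- ===== Notes on version B (the rewrite author's own statement) =====
-- stated objective: alternative
-- what changed: B replaces A's single loop over six running scalars (on-the-fly min/max of the current position) by a two-phase decomposition: it first collects the list of cells the chords occupy while walking the curve, then computes the rectangle as min/max over that list; Pre_ excludes only the inputs where A raises (empty chord string: IndexError; first character outside aAbB: KeyError).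
import Mathlib
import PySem

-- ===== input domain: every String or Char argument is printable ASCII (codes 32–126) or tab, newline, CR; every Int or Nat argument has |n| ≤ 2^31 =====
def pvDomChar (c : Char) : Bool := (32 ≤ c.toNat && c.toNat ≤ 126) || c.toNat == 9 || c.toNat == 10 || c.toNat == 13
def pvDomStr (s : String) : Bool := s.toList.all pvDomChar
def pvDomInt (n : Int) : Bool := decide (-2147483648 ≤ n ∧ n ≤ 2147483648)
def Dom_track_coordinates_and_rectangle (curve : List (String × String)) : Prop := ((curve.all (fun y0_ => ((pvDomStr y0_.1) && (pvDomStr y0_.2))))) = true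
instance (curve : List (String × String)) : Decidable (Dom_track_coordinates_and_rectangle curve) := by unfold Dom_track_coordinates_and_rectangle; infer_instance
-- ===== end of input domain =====

-- B collects the list of cells the chords occupy in one pass and then reads the rectangle
-- off that list with min/max, instead of A's six running extrema scalars (objective:
-- a different decomposition, same cost).

-- ===== PORT A =====
-- dict lookup coordinate_deltas[(start, ending)]; none = KeyError
def get_coordinate_deltas (start ending : Char) : Option (Int × Int) :=
  PySem.Dict.get? (PySem.Dict.ofList
    [ (('a','a'), ((0:Int),(-1:Int))), (('a','A'), (0,1)), (('a','b'), (-1,0)), (('a','B'), (1,0))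
    , (('b','a'), (0,-1)), (('b','A'), (0,1)), (('b','b'), (-1,0)), (('b','B'), (1,0))
    , (('A','a'), (0,-1)), (('A','A'), (0,1)), (('A','b'), (-1,0)), (('A','B'), (1,0))
    , (('B','a'), (0,-1)), (('B','A'), (0,1)), (('B','b'), (-1,0)), (('B','B'), (1,0)) ])
    (start, ending)

-- `.getD` defaults are only reached where the Python raises (excluded by Pre_).
def track_coordinates_and_rectangle (curve : List (String × String)) : (Int × Int) × (Int × Int) :=
  let st := curve.foldl (fun (st : (Int × Int) × (Int × Int) × (Int × Int)) chord =>
    let delta := (get_coordinate_deltas ((PySem.Str.pyGet? chord.1 0).getD ' ')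
                                        ((PySem.Str.pyGet? chord.2 0).getD ' ')).getD (0, 0)
    (((max st.1.1 st.2.2.1, min st.1.2 st.2.2.1) : Int × Int),
     ((max st.2.1.1 st.2.2.2, min st.2.1.2 st.2.2.2) : Int × Int),
     ((st.2.2.1 + delta.1, st.2.2.2 + delta.2) : Int × Int)))
    (((0,0) : Int × Int), ((0,0) : Int × Int), ((0,0) : Int × Int))
  ((st.2.2.1, st.2.2.2), (st.1.1 - st.1.2 + 1, st.2.1.1 - st.2.1.2 + 1))

-- ===== PORT B =====
-- DELTAS[c]; none = KeyError
def pvDeltaB (c : Char) : Option (Int × Int) :=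
  PySem.Dict.get? (PySem.Dict.ofList
    [ ('a', ((0:Int),(-1:Int))), ('A', (0,1)), ('b', (-1,0)), ('B', (1,0)) ]) c

def track_coordinates_and_rectangle_alt (curve : List (String × String)) : (Int × Int) × (Int × Int) :=
  let st := curve.foldl (fun (st : List (Int × Int) × Int × Int) chord =>
      let cells := st.1 ++ [(st.2.1, st.2.2)]
      let d := (pvDeltaB ((PySem.Str.pyGet? chord.2 0).getD ' ')).getD (0, 0)
      (cells, st.2.1 + d.1, st.2.2 + d.2))
    ([((0:Int), (0:Int))], (0:Int), (0:Int))
  let xs := st.1.map Prod.fst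
  let ys := st.1.map Prod.snd
  ((st.2.1, st.2.2),
   ((PySem.List.max? xs (fun x => x)).getD 0 - (PySem.List.min? xs (fun x => x)).getD 0 + 1,
    (PySem.List.max? ys (fun x => x)).getD 0 - (PySem.List.min? ys (fun x => x)).getD 0 + 1))

-- ===== PRECONDITION & SPEC =====
-- Pre_ excludes exactly the inputs where A raises: a chord whose first or second string
-- is empty (IndexError) or starts with a character outside {a,A,b,B} (KeyError).
def pvChordOk (s : String) : Bool :=
  match s.toList with
  | [] => false
  | c :: _ => c == 'a' || c == 'A' || c == 'b' || c == 'B'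

def Pre_track_coordinates_and_rectangle (curve : List (String × String)) : Prop :=
  curve.all (fun p => pvChordOk p.1 && pvChordOk p.2) = true

instance (curve : List (String × String)) : Decidable (Pre_track_coordinates_and_rectangle curve) := by
  unfold Pre_track_coordinates_and_rectangle; infer_instance

def pvWitness_track_coordinates_and_rectangle : (List (String × String)) :=
  [("a", "B"), ("Bx", "ay")]

def Spec_track_coordinates_and_rectangle (curve : List (String × String)) (out : (Int × Int) × (Int × Int)) : Prop := out = track_coordinates_and_rectangle_alt curve
instance (curve : List (String × String)) (out : (Int × Int) × (Int × Int)) : Decidable (Spec_track_coordinates_and_rectangle curve out) := by unfold Spec_track_coordinates_and_rectangle; infer_instance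

-- ===== CLAIM (what is proved, stated in full; the proofs are below) =====
def Claim_equal_track_coordinates_and_rectangle : Prop := ∀ (curve : List (String × String)), Dom_track_coordinates_and_rectangle curve → Pre_track_coordinates_and_rectangle curve → Spec_track_coordinates_and_rectangle curve (track_coordinates_and_rectangle curve)

-- ===== LEMMAS AND PROOFS =====

-- the step delta of a chord, read from the first character of its second component
def pvDir : Char → Int × Int
  | 'a' => (0, -1) | 'A' => (0, 1) | 'b' => (-1, 0) | 'B' => (1, 0) | _ => (0, 0)

def pvDirs (curve : List (String × String)) : List (Int × Int) :=
  curve.map (fun ch => pvDir (ch.2.toList.headD ' '))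

-- cumulative positions of a delta list starting at p
def pvPath (p : Int × Int) : List (Int × Int) → List (Int × Int)
  | [] => [p]
  | d :: ds => p :: pvPath (p.1 + d.1, p.2 + d.2) ds

theorem pvPath_ne_nil (p : Int × Int) (ds : List (Int × Int)) : pvPath p ds ≠ [] := by
  cases ds <;> simp [pvPath]

-- the effective delta of a chord admitted by Pre_ is pvDir of the second string's head
theorem pvDeltaB_dir (e : String) (he : pvChordOk e = true) :
    (pvDeltaB ((PySem.Str.pyGet? e 0).getD ' ')).getD (0, 0) = pvDir (e.toList.headD ' ') := by
  unfold pvChordOk at he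
  rcases h2 : e.toList with _ | ⟨d, ds⟩ <;> rw [h2] at he
  · exact absurd he (by simp)
  have g2 : (PySem.Str.pyGet? e 0).getD ' ' = d := by
    simp [PySem.Str.pyGet?_eq, h2]
  rw [g2]
  simp only [Bool.or_eq_true, beq_iff_eq] at he
  rcases he with ((rfl | rfl) | rfl) | rfl <;> simp only [List.headD_cons] <;> decide

theorem pvDeltaA_dir (s e : String) (hs : pvChordOk s = true) (he : pvChordOk e = true) :
    (get_coordinate_deltas ((PySem.Str.pyGet? s 0).getD ' ') ((PySem.Str.pyGet? e 0).getD ' ')).getD (0, 0)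
      = pvDir (e.toList.headD ' ') := by
  unfold pvChordOk at hs he
  rcases h1 : s.toList with _ | ⟨c, cs⟩ <;> rw [h1] at hs
  · exact absurd hs (by simp)
  rcases h2 : e.toList with _ | ⟨d, ds⟩ <;> rw [h2] at he
  · exact absurd he (by simp)
  have g1 : (PySem.Str.pyGet? s 0).getD ' ' = c := by
    simp [PySem.Str.pyGet?_eq, h1]
  have g2 : (PySem.Str.pyGet? e 0).getD ' ' = d := by
    simp [PySem.Str.pyGet?_eq, h2]
  rw [g1, g2]
  simp only [Bool.or_eq_true, beq_iff_eq] at hs he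
  rcases hs with ((rfl | rfl) | rfl) | rfl <;> rcases he with ((rfl | rfl) | rfl) | rfl <;>
    simp only [List.headD_cons] <;> decide

-- A's fold, characterised over the delta list
theorem pvA_fold (ds : List (Int × Int)) :
    ∀ (M m N n i j : Int),
      ds.foldl (fun (st : (Int × Int) × (Int × Int) × (Int × Int)) delta =>
        (((max st.1.1 st.2.2.1, min st.1.2 st.2.2.1) : Int × Int),
         ((max st.2.1.1 st.2.2.2, min st.2.1.2 st.2.2.2) : Int × Int),
         ((st.2.2.1 + delta.1, st.2.2.2 + delta.2) : Int × Int))) ((M, m), (N, n), (i, j))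
      = ((((pvPath (i, j) ds).dropLast.map Prod.fst).foldl max M,
          ((pvPath (i, j) ds).dropLast.map Prod.fst).foldl min m),
         (((pvPath (i, j) ds).dropLast.map Prod.snd).foldl max N,
          ((pvPath (i, j) ds).dropLast.map Prod.snd).foldl min n),
         (pvPath (i, j) ds).getLast (pvPath_ne_nil _ _)) := by
  induction ds with
  | nil => intro M m N n i j; simp [pvPath]
  | cons d t ih =>
    intro M m N n i j
    simp only [List.foldl_cons, ih]
    have hd : (pvPath (i, j) (d :: t)).dropLast
        = (i, j) :: (pvPath (i + d.1, j + d.2) t).dropLast := by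
      simp [pvPath, List.dropLast_cons_of_ne_nil (pvPath_ne_nil _ _)]
    have hl : (pvPath (i, j) (d :: t)).getLast (pvPath_ne_nil _ _)
        = (pvPath (i + d.1, j + d.2) t).getLast (pvPath_ne_nil _ _) := by
      simp [pvPath, List.getLast_cons (pvPath_ne_nil _ _)]
    simp [hd, hl]

-- B's cell-collecting fold, characterised over the delta list
theorem pvB_fold (ds : List (Int × Int)) :
    ∀ (cells : List (Int × Int)) (i j : Int),
      ds.foldl (fun (st : List (Int × Int) × Int × Int) d =>
          (st.1 ++ [(st.2.1, st.2.2)], st.2.1 + d.1, st.2.2 + d.2)) (cells, i, j)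
      = (cells ++ (pvPath (i, j) ds).dropLast,
         ((pvPath (i, j) ds).getLast (pvPath_ne_nil _ _)).1,
         ((pvPath (i, j) ds).getLast (pvPath_ne_nil _ _)).2) := by
  induction ds with
  | nil => intro cells i j; simp [pvPath]
  | cons d t ih =>
    intro cells i j
    simp only [List.foldl_cons, ih]
    have hd : (pvPath (i, j) (d :: t)).dropLast
        = (i, j) :: (pvPath (i + d.1, j + d.2) t).dropLast := by
      simp [pvPath, List.dropLast_cons_of_ne_nil (pvPath_ne_nil _ _)]
    have hl : (pvPath (i, j) (d :: t)).getLast (pvPath_ne_nil _ _)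
        = (pvPath (i + d.1, j + d.2) t).getLast (pvPath_ne_nil _ _) := by
      simp [pvPath, List.getLast_cons (pvPath_ne_nil _ _)]
    simp [hd, hl]

theorem pvMaxHead (l : List Int) :
    (PySem.List.max? ((0:Int) :: l) (fun x => x)).getD 0 = l.foldl max 0 := by
  rw [PySem.List.max?_id_cons]; rfl

theorem pvMinHead (l : List Int) :
    (PySem.List.min? ((0:Int) :: l) (fun x => x)).getD 0 = l.foldl min 0 := by
  rw [PySem.List.min?_id_cons]; rfl

-- shorthand for the quantities both ports reduce to (proof-side only)
def pvE (curve : List (String × String)) : Int × Int :=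
  (pvPath (0, 0) (pvDirs curve)).getLast (pvPath_ne_nil _ _)
def pvXs (curve : List (String × String)) : List Int :=
  (pvPath (0, 0) (pvDirs curve)).dropLast.map Prod.fst
def pvYs (curve : List (String × String)) : List Int :=
  (pvPath (0, 0) (pvDirs curve)).dropLast.map Prod.snd

theorem pvA_char (curve : List (String × String))
    (hpre : Pre_track_coordinates_and_rectangle curve) :
    track_coordinates_and_rectangle curve
      = (pvE curve,
         ((pvXs curve).foldl max 0 - (pvXs curve).foldl min 0 + 1,
          (pvYs curve).foldl max 0 - (pvYs curve).foldl min 0 + 1)) := by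
  unfold track_coordinates_and_rectangle
  unfold Pre_track_coordinates_and_rectangle at hpre
  simp only [List.all_eq_true, Bool.and_eq_true] at hpre
  have hfold :
      curve.foldl (fun (st : (Int × Int) × (Int × Int) × (Int × Int)) chord =>
        let delta := (get_coordinate_deltas ((PySem.Str.pyGet? chord.1 0).getD ' ')
                                            ((PySem.Str.pyGet? chord.2 0).getD ' ')).getD (0, 0)
        (((max st.1.1 st.2.2.1, min st.1.2 st.2.2.1) : Int × Int),
         ((max st.2.1.1 st.2.2.2, min st.2.1.2 st.2.2.2) : Int × Int),
         ((st.2.2.1 + delta.1, st.2.2.2 + delta.2) : Int × Int)))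
        (((0,0) : Int × Int), ((0,0) : Int × Int), ((0,0) : Int × Int))
      = (pvDirs curve).foldl
          (fun (st : (Int × Int) × (Int × Int) × (Int × Int)) delta =>
            (((max st.1.1 st.2.2.1, min st.1.2 st.2.2.1) : Int × Int),
             ((max st.2.1.1 st.2.2.2, min st.2.1.2 st.2.2.2) : Int × Int),
             ((st.2.2.1 + delta.1, st.2.2.2 + delta.2) : Int × Int)))
          (((0,0) : Int × Int), ((0,0) : Int × Int), ((0,0) : Int × Int)) := by
    unfold pvDirs
    rw [List.foldl_map]
    apply PySem.List.foldl_congr_mem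
    intro st chord hmem
    rw [pvDeltaA_dir chord.1 chord.2 (hpre chord hmem).1 (hpre chord hmem).2]
  simp only [hfold, pvA_fold (pvDirs curve) 0 0 0 0 0 0]
  rfl

theorem pvB_char (curve : List (String × String))
    (hpre : Pre_track_coordinates_and_rectangle curve) :
    track_coordinates_and_rectangle_alt curve
      = (pvE curve,
         ((pvXs curve).foldl max 0 - (pvXs curve).foldl min 0 + 1,
          (pvYs curve).foldl max 0 - (pvYs curve).foldl min 0 + 1)) := by
  unfold track_coordinates_and_rectangle_alt
  unfold Pre_track_coordinates_and_rectangle at hpre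
  simp only [List.all_eq_true, Bool.and_eq_true] at hpre
  have hfold :
      curve.foldl (fun (st : List (Int × Int) × Int × Int) chord =>
        let cells := st.1 ++ [(st.2.1, st.2.2)]
        let d := (pvDeltaB ((PySem.Str.pyGet? chord.2 0).getD ' ')).getD (0, 0)
        (cells, st.2.1 + d.1, st.2.2 + d.2)) ([((0:Int), (0:Int))], (0:Int), (0:Int))
      = (pvDirs curve).foldl (fun (st : List (Int × Int) × Int × Int) d =>
          (st.1 ++ [(st.2.1, st.2.2)], st.2.1 + d.1, st.2.2 + d.2))
          ([((0:Int), (0:Int))], (0:Int), (0:Int)) := by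
    unfold pvDirs
    rw [List.foldl_map]
    apply PySem.List.foldl_congr_mem
    intro st chord hmem
    rw [pvDeltaB_dir chord.2 (hpre chord hmem).2]
  simp only [hfold, pvB_fold (pvDirs curve) [((0:Int), (0:Int))] 0 0]
  have hx : (([((0:Int), (0:Int))] ++ (pvPath ((0:Int), (0:Int)) (pvDirs curve)).dropLast).map Prod.fst)
      = (0:Int) :: pvXs curve := by
    simp [pvXs]
  have hy : (([((0:Int), (0:Int))] ++ (pvPath ((0:Int), (0:Int)) (pvDirs curve)).dropLast).map Prod.snd)
      = (0:Int) :: pvYs curve := by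
    simp [pvYs]
  simp only [hx, hy, pvMaxHead, pvMinHead]
  rfl

-- ===== VERDICT (by name: the statement is the Claim_ definition above) =====
theorem track_coordinates_and_rectangle_spec : Claim_equal_track_coordinates_and_rectangle := by
  intro curve _ hpre
  rw [Spec_track_coordinates_and_rectangle, pvA_char curve hpre, pvB_char curve hpre]
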